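-- pv_equiv track=rewrite | github.com/programjames/battlecode23 | bytecode_scripts/dijkstra.py | add_nest
-- ===== SOURCE A (Python) =====
-- def parent(n):
--     return (n - 1) // 2
--
-- def add_nest(n):
--     if n == 0:
--         return "queue0 = n;"
--     return f"""if(costs[queue{parent(n)}] > cost) {{
--         queue{n} = queue{parent(n)};
--         {add_nest(parent(n))}
--     }} else {{
--         queue{n} = n;
--     }}"""
-- ===== SOURCE B (Python) =====
-- def add_nest(n):
--     # Iterative inside-out construction over the precomputed ancestor chain
--     chain = [n]
--     while chain[-1] != 0:
--         chain.append((chain[-1] - 1) // 2)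
--     result = "queue0 = n;"
--     for m in chain[-2::-1]:
--         p = (m - 1) // 2
--         result = ("if(costs[queue%d] > cost) {\n"
--                   "        queue%d = queue%d;\n"
--                   "        %s\n"
--                   "    } else {\n"
--                   "        queue%d = n;\n"
--                   "    }" % (p, m, p, result, m))
--     return result
-- ===== Notes on version B (the rewrite author's own statement) =====
-- stated objective: alternative
-- what changed: Replaces A's self-recursion by first computing the explicit ancestor chain [n, parent(n), ..., 0] with a while loop and then building the string iteratively from the inside out, wrapping the accumulated result for each chain node.
import Mathlib
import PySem

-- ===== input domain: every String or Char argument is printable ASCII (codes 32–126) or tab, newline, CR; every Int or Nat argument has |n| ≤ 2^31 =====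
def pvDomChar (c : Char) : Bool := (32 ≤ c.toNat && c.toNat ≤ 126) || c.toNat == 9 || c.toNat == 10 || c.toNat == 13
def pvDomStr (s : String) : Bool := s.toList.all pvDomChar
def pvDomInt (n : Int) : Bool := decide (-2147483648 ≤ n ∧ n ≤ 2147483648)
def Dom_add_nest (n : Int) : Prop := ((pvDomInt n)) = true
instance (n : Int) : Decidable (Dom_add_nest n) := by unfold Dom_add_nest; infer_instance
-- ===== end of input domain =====

-- B replaces A's recursion by an explicit ancestor chain plus an inside-out iterative wrap (objective: alternative decomposition, same cost).

-- ===== PORT A =====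
-- helper `parent` of Source A
def pyParent (n : Int) : Int := PySem.Int.floordiv (n - 1) 2

-- fuel makes the (for n ≥ 0 terminating, for n < 0 divergent) Python recursion total; n.toNat + 1 fuel is proved sufficient on Pre_
def add_nestF : Nat → Int → String
  | 0, _ => ""
  | fuel + 1, n =>
    if n = 0 then "queue0 = n;"
    else "if(costs[queue" ++ PySem.Int.toStr (pyParent n) ++ "] > cost) {\n        queue"
      ++ PySem.Int.toStr n ++ " = queue" ++ PySem.Int.toStr (pyParent n) ++ ";\n        "
      ++ add_nestF fuel (pyParent n)
      ++ "\n    } else {\n        queue" ++ PySem.Int.toStr n ++ " = n;\n    }"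

def add_nest (n : Int) : String := add_nestF (n.toNat + 1) n

-- ===== PORT B =====
-- Source B's `while chain[-1] != 0: chain.append(...)` loop, fueled (diverges in Python for n < 0, outside Pre_)
def chainF : Nat → Int → List Int
  | 0, m => [m]
  | fuel + 1, m =>
    if m = 0 then [m] else m :: chainF fuel (PySem.Int.floordiv (m - 1) 2)

-- one iteration of Source B's for-loop body
def wrapB (m : Int) (r : String) : String :=
  let p := PySem.Int.floordiv (m - 1) 2
  "if(costs[queue" ++ PySem.Int.toStr p ++ "] > cost) {\n        queue"
    ++ PySem.Int.toStr m ++ " = queue" ++ PySem.Int.toStr p ++ ";\n        "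
    ++ r ++ "\n    } else {\n        queue" ++ PySem.Int.toStr m ++ " = n;\n    }"

def add_nest_alt (n : Int) : String :=
  let chain := chainF (n.toNat + 1) n
  (chain.dropLast.reverse).foldl (fun r m => wrapB m r) "queue0 = n;"

-- ===== PRECONDITION & SPEC =====
-- Pre_ excludes n < 0, where Python A never returns (infinite recursion / RecursionError: parent(-1) = -1).
def Pre_add_nest (n : Int) : Prop := 0 ≤ n
instance (n : Int) : Decidable (Pre_add_nest n) := by unfold Pre_add_nest; infer_instance
def pvWitness_add_nest : Int := (6)

def Spec_add_nest (n : Int) (out : String) : Prop := out = add_nest_alt n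
instance (n : Int) (out : String) : Decidable (Spec_add_nest n out) := by unfold Spec_add_nest; infer_instance

-- ===== CLAIM (what is proved, stated in full; the proofs are below) =====
def Claim_equal_add_nest : Prop := ∀ (n : Int), Dom_add_nest n → Pre_add_nest n → Spec_add_nest n (add_nest n)

-- ===== LEMMAS AND PROOFS =====
theorem chainF_ne_nil (fuel : Nat) (m : Int) : chainF fuel m ≠ [] := by
  cases fuel with
  | zero => simp [chainF]
  | succ f => unfold chainF; split <;> simp

theorem parent_bounds (n : Int) (h0 : 0 ≤ n) (hne : n ≠ 0) :
    0 ≤ pyParent n ∧ pyParent n < n := by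
  unfold pyParent
  rw [PySem.Int.floordiv_eq_ediv_of_pos (by omega)]
  omega

theorem main_eq : ∀ (fuel : Nat) (n : Int), 0 ≤ n → n.toNat < fuel →
    add_nestF fuel n
      = ((chainF fuel n).dropLast.reverse).foldl (fun r m => wrapB m r) "queue0 = n;" := by
  intro fuel
  induction fuel with
  | zero => intro n _ h; omega
  | succ f ih =>
    intro n h0 hf
    by_cases hz : n = 0
    · subst hz; simp [add_nestF, chainF]
    · have hp := parent_bounds n h0 hz
      have hpf : (pyParent n).toNat < f := by omega
      have hrec := ih (pyParent n) hp.1 hpf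
      have hnn : chainF f (pyParent n) ≠ [] := chainF_ne_nil f (pyParent n)
      unfold add_nestF chainF
      simp only [if_neg hz]
      rw [show PySem.Int.floordiv (n - 1) 2 = pyParent n from rfl,
        List.dropLast_cons_of_ne_nil hnn, List.reverse_cons, List.foldl_append]
      show _ = wrapB n (((chainF f (pyParent n)).dropLast.reverse).foldl
          (fun r m => wrapB m r) "queue0 = n;")
      rw [← hrec]
      simp [wrapB, pyParent, String.append_assoc]

-- ===== VERDICT (by name: the statement is the Claim_ definition above) =====
theorem add_nest_spec : Claim_equal_add_nest := by
  intro n _ hpre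
  unfold Spec_add_nest add_nest add_nest_alt
  exact main_eq (n.toNat + 1) n hpre (by omega)
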